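-- pv_equiv track=rewrite | github.com/smie8/tira2022 | week7/segments.py | find
-- ===== SOURCE A (Python) =====
-- def find(t, x):
--     length = 1
--     longest = 1
--
--     for i in range(len(t)):
--         for j in range(i+1, len(t)):
--             if t[i] <= t[j] and t[j] - t[i] <= x:
--                 length = j - i + 1
--                 if length > longest:
--                     longest = length
--             else:
--                 length = 1
--
--     return longest
-- ===== SOURCE B (Python) =====
-- def find(t, x):
--     # one pass over end indices with a dict of first-occurrence index per distinct
--     # value: the earliest start with a given value maximises the span, so only
--     # first occurrences need scanning (alternative decomposition; return value only)
--     first = {}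
--     longest = 1
--     for j, v in enumerate(t):
--         for u, i in first.items():
--             if u <= v and v - u <= x and j - i + 1 > longest:
--                 longest = j - i + 1
--         if v not in first:
--             first[v] = j
--     return longest
-- ===== Notes on version B (the rewrite author's own statement) =====
-- stated objective: alternative
-- what changed: A scans all O(n^2) start/end index pairs; B makes one pass over end indices while maintaining a dict of first-occurrence index per distinct value and scans only those first occurrences (the earliest start with a given value maximises the span), which collapses duplicate values into a single candidate.
import Mathlib
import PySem

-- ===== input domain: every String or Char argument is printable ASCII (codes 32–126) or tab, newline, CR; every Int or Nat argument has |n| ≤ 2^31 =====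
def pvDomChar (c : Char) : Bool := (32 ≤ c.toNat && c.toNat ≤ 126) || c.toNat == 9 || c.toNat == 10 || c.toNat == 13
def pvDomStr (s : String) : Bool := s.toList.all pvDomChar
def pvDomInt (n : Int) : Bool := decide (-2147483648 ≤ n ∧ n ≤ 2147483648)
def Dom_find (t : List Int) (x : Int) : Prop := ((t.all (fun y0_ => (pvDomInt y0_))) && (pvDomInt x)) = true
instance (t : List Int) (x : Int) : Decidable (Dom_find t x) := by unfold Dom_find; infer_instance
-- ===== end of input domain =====

-- B replaces A's all-pairs double scan by one pass over end indices with a dict of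
-- first-occurrence index per distinct value (alternative decomposition, not claimed faster).

-- ===== PORT A =====
def find (t : List Int) (x : Int) : Int :=
  -- state = (length, longest); indices are in range, so pyGetD is exact for t[i]
  (((PySem.List.pyRange 0 (t.length : Int) 1).foldl (fun (st : Int × Int) i =>
      (PySem.List.pyRange (i + 1) (t.length : Int) 1).foldl (fun (st : Int × Int) j =>
        if PySem.List.pyGetD t i 0 ≤ PySem.List.pyGetD t j 0 ∧
            PySem.List.pyGetD t j 0 - PySem.List.pyGetD t i 0 ≤ x then
          (j - i + 1, if j - i + 1 > st.2 then j - i + 1 else st.2)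
        else (1, st.2)) st)
    ((1 : Int), (1 : Int)))).2

-- ===== PORT B =====
def find_alt (t : List Int) (x : Int) : Int :=
  (((PySem.List.enumerate t 0).foldl
      (fun (st : PySem.Dict Int Int × Int) jv =>
        let longest := st.1.items.foldl (fun (acc : Int) ui =>
            if ui.1 ≤ jv.2 ∧ jv.2 - ui.1 ≤ x ∧ jv.1 - ui.2 + 1 > acc then jv.1 - ui.2 + 1
            else acc) st.2
        let first := if st.1.contains jv.2 then st.1 else st.1.insert jv.2 jv.1
        (first, longest))
      (PySem.Dict.empty, (1 : Int)))).2

-- ===== PRECONDITION & SPEC =====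
def Spec_find (t : List Int) (x : Int) (out : Int) : Prop := out = find_alt t x
instance (t : List Int) (x : Int) (out : Int) : Decidable (Spec_find t x out) := by unfold Spec_find; infer_instance

-- ===== CLAIM (what is proved, stated in full; the proofs are below) =====
def Claim_equal_find : Prop := ∀ (t : List Int) (x : Int), Dom_find t x → Spec_find t x (find t x)

-- ===== LEMMAS AND PROOFS =====

/-- fold of `max acc (c y)` -/
def msup {β : Type} (c : β → Int) (l : List β) (a : Int) : Int :=
  l.foldl (fun acc y => max acc (c y)) a


theorem msup_cons {β : Type} (c : β → Int) (y : β) (l : List β) (a : Int) :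
    msup c (y :: l) a = msup c l (max a (c y)) := rfl


theorem msup_init_le {β : Type} (c : β → Int) (l : List β) (a : Int) : a ≤ msup c l a := by
  induction l generalizing a with
  | nil => simp [msup]
  | cons y l ih =>
      calc a ≤ max a (c y) := le_max_left _ _
        _ ≤ msup c l (max a (c y)) := ih _
        _ = msup c (y :: l) a := rfl


theorem le_msup_of_mem {β : Type} (c : β → Int) {l : List β} {y : β} (hy : y ∈ l) (a : Int) :
    c y ≤ msup c l a := by
  induction l generalizing a with
  | nil => cases hy
  | cons z l ih =>
      rcases List.mem_cons.mp hy with h | h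
      · subst h
        calc c y ≤ max a (c y) := le_max_right _ _
          _ ≤ msup c l _ := msup_init_le _ _ _
      · exact ih h _

theorem msup_le {β : Type} (c : β → Int) {l : List β} {a b : Int} (hab : a ≤ b)
    (h : ∀ y ∈ l, c y ≤ b) : msup c l a ≤ b := by
  induction l generalizing a with
  | nil => simpa [msup]
  | cons y l ih =>
      exact ih (max_le hab (h y (List.mem_cons_self))) (fun z hz => h z (List.mem_cons_of_mem _ hz))

/-- outer fold of `msup` rows -/
def osup {ι β : Type} (c : ι → β → Int) (ls : ι → List β) (L : List ι) (a : Int) : Int :=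
  L.foldl (fun a i => msup (c i) (ls i) a) a


theorem osup_append {ι β : Type} (c : ι → β → Int) (ls : ι → List β) (L₁ L₂ : List ι) (a : Int) :
    osup c ls (L₁ ++ L₂) a = osup c ls L₂ (osup c ls L₁ a) := by
  simp [osup, List.foldl_append]

theorem osup_init_le {ι β : Type} (c : ι → β → Int) (ls : ι → List β) (L : List ι) (a : Int) :
    a ≤ osup c ls L a := by
  induction L generalizing a with
  | nil => simp [osup]
  | cons i L ih =>
      calc a ≤ msup (c i) (ls i) a := msup_init_le _ _ _
        _ ≤ osup c ls L _ := ih _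

theorem osup_at {ι β : Type} (c : ι → β → Int) (ls : ι → List β) {L : List ι} {i : ι} {y : β}
    (hi : i ∈ L) (hy : y ∈ ls i) (a : Int) : c i y ≤ osup c ls L a := by
  induction L generalizing a with
  | nil => cases hi
  | cons i' L ih =>
      rcases List.mem_cons.mp hi with h | h
      · subst h
        calc c i y ≤ msup (c i) (ls i) a := le_msup_of_mem _ hy _
          _ ≤ osup c ls L _ := osup_init_le _ _ _ _
      · exact ih h _

theorem osup_le {ι β : Type} (c : ι → β → Int) (ls : ι → List β) {L : List ι} {a b : Int}
    (hab : a ≤ b) (h : ∀ i ∈ L, ∀ y ∈ ls i, c i y ≤ b) : osup c ls L a ≤ b := by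
  induction L generalizing a with
  | nil => simpa [osup]
  | cons i L ih =>
      exact ih (msup_le _ hab (h i (List.mem_cons_self))) (fun i' hi' => h i' (List.mem_cons_of_mem _ hi'))

/-- candidate value of the pair (i, j) (Nat indices) -/
def cA (t : List Int) (x : Int) (i j : Nat) : Int :=
  if t.getD i 0 ≤ t.getD j 0 ∧ t.getD j 0 - t.getD i 0 ≤ x then (j : Int) - (i : Int) + 1 else 1

/-- row of inner indices of A at outer index m: m+1 .. n-1 -/
def rowA (t : List Int) (m : Nat) : List Nat :=
  (List.range (t.length - (m + 1))).map (fun k => m + 1 + k)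

theorem mem_rowA {t : List Int} {m j : Nat} : j ∈ rowA t m ↔ m < j ∧ j < t.length := by
  simp only [rowA, List.mem_map, List.mem_range]
  constructor
  · rintro ⟨k, hk, rfl⟩; omega
  · intro h; exact ⟨j - (m + 1), by omega, by omega⟩

def SA (t : List Int) (x : Int) : Int := osup (cA t x) (rowA t) (List.range t.length) 1

/-- B's candidate at end index m for a dict item (value, first index) -/
def cB (t : List Int) (x : Int) (m : Nat) (ui : Int × Int) : Int :=
  if ui.1 ≤ t.getD m 0 ∧ t.getD m 0 - ui.1 ≤ x then (m : Int) - ui.2 + 1 else 1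

/-- the first-occurrence dict after processing the first k elements -/
def DK (t : List Int) : Nat → PySem.Dict Int Int
  | 0 => PySem.Dict.empty
  | k + 1 =>
      let d := DK t k
      if d.contains (t.getD k 0) then d else d.insert (t.getD k 0) (k : Int)

def SB (t : List Int) (x : Int) : Int :=
  osup (cB t x) (fun m => (DK t m).items) (List.range t.length) 1

theorem mem_DK {t : List Int} {k : Nat} {p : Int × Int} :
    p ∈ (DK t k).items ↔
      ∃ m : Nat, m < k ∧ p = (t.getD m 0, (m : Int)) ∧ ∀ m' < m, t.getD m' 0 ≠ t.getD m 0 := by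
  induction k generalizing p with
  | zero => simp [DK, PySem.Dict.empty]
  | succ k ih =>
      have hcont : (DK t k).contains (t.getD k 0) = true ↔
          ∃ m : Nat, m < k ∧ t.getD m 0 = t.getD k 0 ∧ ∀ m' < m, t.getD m' 0 ≠ t.getD m 0 := by
        rw [PySem.Dict.contains_iff_mem_keys]
        unfold PySem.Dict.keys
        simp only [List.mem_map]
        constructor
        · rintro ⟨q, hq, hq1⟩
          rcases (ih (p := q)).mp hq with ⟨m, hm, rfl, hfirst⟩
          exact ⟨m, hm, hq1, hfirst⟩
        · rintro ⟨m, hm, heq, hfirst⟩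
          exact ⟨(t.getD m 0, (m : Int)), (ih (p := (t.getD m 0, (m : Int)))).mpr ⟨m, hm, rfl, hfirst⟩, heq⟩
      have hd : DK t (k+1) =
          (if (DK t k).contains (t.getD k 0) then DK t k
           else (DK t k).insert (t.getD k 0) (k : Int)) := rfl
      by_cases hc : (DK t k).contains (t.getD k 0) = true
      · rw [hd, if_pos hc, ih (p := p)]
        constructor
        · rintro ⟨m, hm, rfl, hfirst⟩; exact ⟨m, by omega, rfl, hfirst⟩
        · rintro ⟨m, hm, rfl, hfirst⟩
          rcases Nat.lt_succ_iff_lt_or_eq.mp hm with hm' | rfl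
          · exact ⟨m, hm', rfl, hfirst⟩
          · rcases hcont.mp hc with ⟨m', hm', heq, _⟩
            exact absurd heq (hfirst m' hm')
      · rw [hd, if_neg hc,
          PySem.Dict.items_insert_of_not_contains (DK t k) ((k : Int)) (by simpa using hc)]
        simp only [List.mem_append, List.mem_singleton, ih (p := p)]
        constructor
        · rintro (⟨m, hm, rfl, hfirst⟩ | rfl)
          · exact ⟨m, by omega, rfl, hfirst⟩
          · refine ⟨k, by omega, rfl, fun m' hm' heq => ?_⟩
            -- an earlier index with t[k]'s value would put its first occurrence in the dict
            have hex : ∃ m, t.getD m 0 = t.getD k 0 := ⟨m', heq⟩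
            have h0 := Nat.find_spec hex
            have hle : Nat.find hex ≤ m' := Nat.find_min' hex heq
            exact hc (hcont.mpr ⟨Nat.find hex, by omega, h0,
              fun m'' hm'' => by
                have := Nat.find_min hex hm''
                rw [h0]; exact this⟩)
        · rintro ⟨m, hm, rfl, hfirst⟩
          rcases Nat.lt_succ_iff_lt_or_eq.mp hm with hm' | rfl
          · exact Or.inl ⟨m, hm', rfl, hfirst⟩
          · exact Or.inr rfl

/-- A's inner-loop candidate for outer Int index i and inner Int index j -/
def cInt (t : List Int) (x : Int) (i j : Int) : Int :=
  if PySem.List.pyGetD t i 0 ≤ PySem.List.pyGetD t j 0 ∧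
      PySem.List.pyGetD t j 0 - PySem.List.pyGetD t i 0 ≤ x then j - i + 1 else 1

theorem msup_map {β γ : Type} (c : γ → Int) (f : β → γ) (l : List β) (a : Int) :
    msup c (l.map f) a = msup (fun y => c (f y)) l a := by
  simp [msup, List.foldl_map]

theorem innerA (t : List Int) (x : Int) (i : Int) (l : List Int) (st : Int × Int)
    (h1 : 1 ≤ st.2) :
    (l.foldl (fun (st : Int × Int) j =>
        if PySem.List.pyGetD t i 0 ≤ PySem.List.pyGetD t j 0 ∧
            PySem.List.pyGetD t j 0 - PySem.List.pyGetD t i 0 ≤ x then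
          (j - i + 1, if j - i + 1 > st.2 then j - i + 1 else st.2)
        else (1, st.2)) st).2 = msup (cInt t x i) l st.2 := by
  induction l generalizing st with
  | nil => simp [msup]
  | cons j l ih =>
      simp only [List.foldl_cons, msup_cons]
      by_cases hc : PySem.List.pyGetD t i 0 ≤ PySem.List.pyGetD t j 0 ∧
          PySem.List.pyGetD t j 0 - PySem.List.pyGetD t i 0 ≤ x
      · rw [if_pos hc]
        have hv : max st.2 (cInt t x i j) = if j - i + 1 > st.2 then j - i + 1 else st.2 := by
          unfold cInt
          rw [if_pos hc]
          simp only [max_def]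
          split_ifs <;> omega
        rw [ih ((j - i + 1, if j - i + 1 > st.2 then j - i + 1 else st.2))
              (by simp only []; split_ifs <;> omega), ← hv]
      · rw [if_neg hc]
        have hv : max st.2 (cInt t x i j) = st.2 := by
          unfold cInt
          rw [if_neg hc]
          simp only [max_def]
          split_ifs <;> omega
        rw [ih ((1, st.2)) h1, hv]

theorem outerA (t : List Int) (x : Int) (L : List Int) (st : Int × Int) (h1 : 1 ≤ st.2) :
    (L.foldl (fun (st : Int × Int) i =>
        (PySem.List.pyRange (i + 1) (t.length : Int) 1).foldl (fun (st : Int × Int) j =>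
          if PySem.List.pyGetD t i 0 ≤ PySem.List.pyGetD t j 0 ∧
              PySem.List.pyGetD t j 0 - PySem.List.pyGetD t i 0 ≤ x then
            (j - i + 1, if j - i + 1 > st.2 then j - i + 1 else st.2)
          else (1, st.2)) st) st).2
      = L.foldl (fun a i => msup (cInt t x i) (PySem.List.pyRange (i + 1) (t.length : Int) 1) a)
          st.2 := by
  induction L generalizing st with
  | nil => rfl
  | cons i L ih =>
      simp only [List.foldl_cons]
      have h2 := innerA t x i (PySem.List.pyRange (i + 1) (t.length : Int) 1) st h1
      rw [ih _ (by rw [h2]; exact le_trans h1 (msup_init_le _ _ _)), h2]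

theorem rowEqA (t : List Int) (x : Int) (m : Nat) (a : Int) :
    msup (cInt t x (m : Int)) (PySem.List.pyRange ((m : Int) + 1) (t.length : Int) 1) a
      = msup (cA t x m) (rowA t m) a := by
  rw [PySem.List.pyRange_one]
  have hlen : ((t.length : Int) - ((m : Int) + 1)).toNat = t.length - (m + 1) := by omega
  rw [hlen, msup_map]
  unfold rowA
  rw [msup_map]
  congr 1
  funext k
  show cInt t x (m : Int) ((m : Int) + 1 + (k : Int)) = cA t x m (m + 1 + k)
  have hj : (m : Int) + 1 + (k : Int) = ((m + 1 + k : Nat) : Int) := by push_cast; ring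
  rw [hj]
  unfold cInt cA
  rw [PySem.List.pyGetD_natCast, PySem.List.pyGetD_natCast]

theorem find_eq_SA (t : List Int) (x : Int) : find t x = SA t x := by
  unfold find
  rw [outerA t x _ ((1 : Int), (1 : Int)) (by norm_num)]
  rw [PySem.List.pyRange_zero_natCast, List.foldl_map]
  unfold SA osup
  congr 1
  funext a m
  exact rowEqA t x m a

theorem innerB (x v jint : Int) (l : List (Int × Int)) (acc : Int) (h1 : 1 ≤ acc) :
    (l.foldl (fun (acc : Int) ui =>
        if ui.1 ≤ v ∧ v - ui.1 ≤ x ∧ jint - ui.2 + 1 > acc then jint - ui.2 + 1 else acc) acc)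
      = msup (fun ui : Int × Int => if ui.1 ≤ v ∧ v - ui.1 ≤ x then jint - ui.2 + 1 else 1)
          l acc := by
  induction l generalizing acc with
  | nil => simp [msup]
  | cons ui l ih =>
      simp only [List.foldl_cons, msup_cons]
      by_cases hw : ui.1 ≤ v ∧ v - ui.1 ≤ x
      · by_cases hs : jint - ui.2 + 1 > acc
        · rw [if_pos ⟨hw.1, hw.2, hs⟩, if_pos hw]
          have : max acc (jint - ui.2 + 1) = jint - ui.2 + 1 := by
            simp only [max_def]; split_ifs <;> omega
          rw [this]
          exact ih _ (by omega)
        · rw [if_neg (by tauto), if_pos hw]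
          have : max acc (jint - ui.2 + 1) = acc := by
            simp only [max_def]; split_ifs <;> omega
          rw [this]
          exact ih _ h1
      · rw [if_neg (by tauto), if_neg hw]
        have : max acc 1 = acc := by simp only [max_def]; split_ifs <;> omega
        rw [this]
        exact ih _ h1

theorem Bmain (t : List Int) (x : Int) (k : Nat) :
    ((List.range k).foldl (fun (st : PySem.Dict Int Int × Int) (m : Nat) =>
        let longest := st.1.items.foldl (fun (acc : Int) ui =>
            if ui.1 ≤ t.getD m 0 ∧ t.getD m 0 - ui.1 ≤ x ∧ (m : Int) - ui.2 + 1 > acc then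
              (m : Int) - ui.2 + 1
            else acc) st.2
        let first := if st.1.contains (t.getD m 0) then st.1
          else st.1.insert (t.getD m 0) (m : Int)
        (first, longest)) (PySem.Dict.empty, (1 : Int)))
      = (DK t k, osup (cB t x) (fun m => (DK t m).items) (List.range k) 1) := by
  induction k with
  | zero => rfl
  | succ k ih =>
      rw [List.range_succ, List.foldl_append, ih, List.foldl_cons, List.foldl_nil]
      have hS : (1 : Int) ≤ osup (cB t x) (fun m => (DK t m).items) (List.range k) 1 :=
        osup_init_le _ _ _ _
      rw [osup_append,
        innerB x (t.getD k 0) ((k : Nat) : Int) (DK t k).items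
          (osup (cB t x) (fun m => (DK t m).items) (List.range k) 1) hS]
      rfl

theorem find_alt_eq_SB (t : List Int) (x : Int) : find_alt t x = SB t x := by
  unfold find_alt
  rw [PySem.List.enumerate_eq_map_pyRange t 0]
  simp only [PySem.List.len_eq]
  rw [PySem.List.pyRange_zero_natCast, List.map_map, List.foldl_map]
  simp only [Function.comp, PySem.List.pyGetD_natCast]
  rw [Bmain t x t.length]
  rfl

theorem one_le_SB (t : List Int) (x : Int) : 1 ≤ SB t x := osup_init_le _ _ _ _

theorem one_le_SA (t : List Int) (x : Int) : 1 ≤ SA t x := osup_init_le _ _ _ _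

theorem at_A (t : List Int) (x : Int) {i j : Nat} (hij : i < j) (hj : j < t.length) :
    cA t x i j ≤ SA t x :=
  osup_at _ _ (List.mem_range.mpr (lt_trans hij hj)) (mem_rowA.mpr ⟨hij, hj⟩) 1

theorem at_B (t : List Int) (x : Int) {i j : Nat} (hij : i < j) (hj : j < t.length) :
    cA t x i j ≤ SB t x := by
  have hex : ∃ m, t.getD m 0 = t.getD i 0 := ⟨i, rfl⟩
  have h0 : t.getD (Nat.find hex) 0 = t.getD i 0 := Nat.find_spec hex
  have hle : Nat.find hex ≤ i := Nat.find_min' hex rfl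
  have hmem : (t.getD i 0, ((Nat.find hex : Nat) : Int)) ∈ (DK t j).items := by
    refine mem_DK.mpr ⟨Nat.find hex, by omega, by rw [h0], fun m' hm' => ?_⟩
    rw [h0]
    exact Nat.find_min hex hm'
  have hcb : cA t x i j ≤ cB t x j (t.getD i 0, ((Nat.find hex : Nat) : Int)) := by
    unfold cA cB
    split_ifs with h
    · have : ((Nat.find hex : Nat) : Int) ≤ (i : Int) := by exact_mod_cast hle
      omega
    · exact le_refl 1
  refine hcb.trans ?_
  unfold SB
  exact osup_at _ _ (List.mem_range.mpr hj) hmem 1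

theorem SA_eq_SB (t : List Int) (x : Int) : SA t x = SB t x := by
  refine le_antisymm ?_ ?_
  · refine osup_le _ _ (one_le_SB t x) ?_
    intro i hi y hy
    rcases mem_rowA.mp hy with ⟨h1, h2⟩
    exact at_B t x h1 h2
  · refine osup_le _ _ (one_le_SA t x) ?_
    intro m hm ui hui
    rcases mem_DK.mp hui with ⟨m', hm', rfl, _⟩
    have : cB t x m (t.getD m' 0, (m' : Int)) = cA t x m' m := rfl
    rw [this]
    exact at_A t x hm' (List.mem_range.mp hm)

-- ===== VERDICT (by name: the statement is the Claim_ definition above) =====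
theorem find_spec : Claim_equal_find := by
  intro t x _
  unfold Spec_find
  rw [find_eq_SA, find_alt_eq_SB, SA_eq_SB]
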